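-- pv_equiv track=rewrite | github.com/HeyJunie/GroupStudy | 06_09/08.py | solution
-- ===== SOURCE A (Python) =====
-- import heapq
--
-- def solution(nums):
--     answer = []
--     minH = []
--     for x in nums:
--         if x == 0:
--             if len(minH) == 0:
--                 answer.append(-1)
--             else:
--                 answer.append(heapq.heappop(minH))
--         else:
--             heapq.heappush(minH, x)
--     return answer
-- ===== SOURCE B (Python) =====
-- def solution(nums):
--     answer = []
--     pool = []
--     for x in nums:
--         if x == 0:
--             if not pool:
--                 answer.append(-1)
--             else:
--                 m = min(pool)
--                 pool.remove(m)
--                 answer.append(m)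
--         else:
--             pool.append(x)
--     return answer
-- ===== Notes on version B (the rewrite author's own statement) =====
-- stated objective: simpler
-- what changed: Replaces the binary heap (heapq push/pop with sift-up/sift-down) by a plain unsorted list maintained by append, with a linear min-scan and first-occurrence removal only when a zero is read.
import Mathlib
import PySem

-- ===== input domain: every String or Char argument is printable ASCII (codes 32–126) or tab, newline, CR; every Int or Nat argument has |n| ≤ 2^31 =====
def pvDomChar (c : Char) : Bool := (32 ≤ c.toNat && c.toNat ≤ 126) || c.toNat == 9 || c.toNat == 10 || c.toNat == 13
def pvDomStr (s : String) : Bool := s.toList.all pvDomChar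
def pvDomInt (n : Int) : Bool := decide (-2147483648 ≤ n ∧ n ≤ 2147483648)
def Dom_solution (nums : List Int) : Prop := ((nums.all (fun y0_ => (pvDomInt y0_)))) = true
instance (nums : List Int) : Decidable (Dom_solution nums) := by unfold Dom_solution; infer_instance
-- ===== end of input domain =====

-- B keeps a plain unsorted list with a linear min-scan and first-occurrence removal
-- instead of A's binary heap (heapq); objective: simpler.  Return-value equivalence only
-- (A mutates its local heap, not its argument).

-- ===== PORT A =====
-- Faithful port of CPython's pure-Python heapq used by A.  _siftdown (bubble-up) with
-- the held-out newitem; parentpos = (pos-1)>>1; strict '<' comparisons; locals inlined.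
def siftdownGo (heap : List Int) (startpos pos : Nat) (newitem : Int) : List Int :=
  if _h : startpos < pos then
    if newitem < heap.getD ((pos - 1) / 2) 0 then
      siftdownGo (heap.set pos (heap.getD ((pos - 1) / 2) 0)) startpos ((pos - 1) / 2) newitem
    else heap.set pos newitem
  else heap.set pos newitem
  termination_by pos
  decreasing_by omega

-- the 'childpos = rightpos' choice inside CPython's _siftup loop
def chooseChild (heap : List Int) (pos : Nat) : Nat :=
  if 2 * pos + 2 < heap.length ∧ ¬ (heap.getD (2 * pos + 1) 0 < heap.getD (2 * pos + 2) 0)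
  then 2 * pos + 2 else 2 * pos + 1

-- CPython's _siftup: move the smaller child up until a leaf, then _siftdown back up.
def siftupGo (heap : List Int) (startpos pos : Nat) (newitem : Int) : List Int :=
  if _h : 2 * pos + 1 < heap.length then
    siftupGo (heap.set pos (heap.getD (chooseChild heap pos) 0)) startpos (chooseChild heap pos) newitem
  else siftdownGo heap startpos pos newitem
  termination_by heap.length - pos
  decreasing_by simp only [List.length_set]; unfold chooseChild; split <;> omega

-- heapq.heappush: append, then sift down from the new last slot
def heappush (heap : List Int) (item : Int) : List Int :=
  siftdownGo (heap ++ [item]) 0 heap.length item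

-- heapq.heappop: pop the last element; if elements remain, return the root, put the
-- last element at the root and sift up.  (A only calls it on a nonempty heap.)
def heappop (heap : List Int) : Int × List Int :=
  if heap.dropLast.isEmpty then (heap.getD (heap.length - 1) 0, heap.dropLast)
  else (heap.dropLast.getD 0 0,
        siftupGo (heap.dropLast.set 0 (heap.getD (heap.length - 1) 0)) 0 0 (heap.getD (heap.length - 1) 0))

-- body of A's for-loop, state = (answer, minH)
def stepA (st : List Int × List Int) (x : Int) : List Int × List Int :=
  if x = 0 then
    if st.2.length = 0 then (st.1 ++ [-1], st.2)
    else (st.1 ++ [(heappop st.2).1], (heappop st.2).2)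
  else (st.1, heappush st.2 x)

def solution (nums : List Int) : List Int :=
  (nums.foldl stepA ([], [])).1

-- ===== PORT B =====
-- body of B's for-loop, state = (answer, pool); min(pool) = PySem.List.min?,
-- pool.remove(m) = PySem.List.remove? (first occurrence; the none branch is
-- unreachable since the minimum is a member).
def stepB (st : List Int × List Int) (x : Int) : List Int × List Int :=
  if x = 0 then
    match PySem.List.min? st.2 (fun y => y) with
    | none => (st.1 ++ [-1], st.2)
    | some m =>
      match PySem.List.remove? st.2 m with
      | some p => (st.1 ++ [m], p)
      | none => (st.1, st.2)
  else (st.1, st.2 ++ [x])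

def solution_alt (nums : List Int) : List Int :=
  (nums.foldl stepB ([], [])).1

-- ===== PRECONDITION & SPEC =====
def Spec_solution (nums : List Int) (out : List Int) : Prop := out = solution_alt nums
instance (nums : List Int) (out : List Int) : Decidable (Spec_solution nums out) := by unfold Spec_solution; infer_instance

-- ===== CLAIM (what is proved, stated in full; the proofs are below) =====
def Claim_equal_solution : Prop := ∀ (nums : List Int), Dom_solution nums → Spec_solution nums (solution nums)

-- ===== LEMMAS AND PROOFS =====

-- the binary-heap ordering invariant on the backing list
def IsHeap (l : List Int) : Prop :=
  ∀ j, j < l.length → 0 < j → l.getD ((j - 1) / 2) 0 ≤ l.getD j 0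

-- heap-with-a-hole at `pos`: parent/child pairs not involving the hole are ordered
def Hp1 (l : List Int) (pos : Nat) : Prop :=
  ∀ j, j < l.length → 0 < j → j ≠ pos → (j - 1) / 2 ≠ pos → l.getD ((j - 1) / 2) 0 ≤ l.getD j 0

-- children of the hole are dominated by the hole's parent
def Hp2 (l : List Int) (pos : Nat) : Prop :=
  ∀ j, j < l.length → 0 < j → (j - 1) / 2 = pos → 0 < pos → l.getD ((pos - 1) / 2) 0 ≤ l.getD j 0

-- the held-out item is below the hole's children
def Hp3 (l : List Int) (pos : Nat) (ni : Int) : Prop :=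
  ∀ j, j < l.length → 0 < j → (j - 1) / 2 = pos → ni ≤ l.getD j 0


theorem getD_set_ne (l : List Int) (i j : Nat) (a : Int) (h : i ≠ j) :
    (l.set i a).getD j 0 = l.getD j 0 := by
  simp [List.getD_eq_getElem?_getD, List.getElem?_set_ne, h]

theorem getD_set_self (l : List Int) (i : Nat) (a : Int) (h : i < l.length) :
    (l.set i a).getD i 0 = a := by
  simp [List.getD_eq_getElem?_getD, h]

theorem multiset_set (l : List Int) (i : Nat) (a : Int) (h : i < l.length) :
    ((l.set i a : List Int) : Multiset Int) + {l.getD i 0} = (l : Multiset Int) + {a} := by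
  induction l generalizing i with
  | nil => simp at h
  | cons hd tl ih =>
    cases i with
    | zero =>
      simp only [List.set, List.getD_cons_zero, ← Multiset.cons_coe]
      rw [add_comm, add_comm _ ({a} : Multiset Int), Multiset.singleton_add, Multiset.singleton_add]
      exact Multiset.cons_swap _ _ _
    | succ i =>
      simp only [List.set, List.getD_cons_succ, ← Multiset.cons_coe, Multiset.cons_add]
      rw [ih i (by simpa using h)]

theorem set_swap_perm (l : List Int) (p pp : Nat) (ni : Int)
    (hpp : pp < l.length) (hp : p < l.length) (hne : pp ≠ p) :
    (((l.set p (l.getD pp 0)).set pp ni : List Int) : Multiset Int)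
      = ((l.set p ni : List Int) : Multiset Int) := by
  have h1 := multiset_set (l.set p (l.getD pp 0)) pp ni (by simpa using hpp)
  have h2 := multiset_set l p (l.getD pp 0) hp
  have h3 := multiset_set l p ni hp
  rw [getD_set_ne l p pp _ (by omega)] at h1
  have key : (((l.set p (l.getD pp 0)).set pp ni : List Int) : Multiset Int) + {l.getD pp 0} + {l.getD p 0}
       = ((l.set p ni : List Int) : Multiset Int) + {l.getD pp 0} + {l.getD p 0} := by
    calc (((l.set p (l.getD pp 0)).set pp ni : List Int) : Multiset Int) + {l.getD pp 0} + {l.getD p 0}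
        = ((l.set p (l.getD pp 0) : List Int) : Multiset Int) + {ni} + {l.getD p 0} := by rw [h1]
      _ = ((l.set p (l.getD pp 0) : List Int) : Multiset Int) + {l.getD p 0} + {ni} := by abel
      _ = (l : Multiset Int) + {l.getD pp 0} + {ni} := by rw [h2]
      _ = (l : Multiset Int) + {ni} + {l.getD pp 0} := by abel
      _ = ((l.set p ni : List Int) : Multiset Int) + {l.getD p 0} + {l.getD pp 0} := by rw [← h3]
      _ = ((l.set p ni : List Int) : Multiset Int) + {l.getD pp 0} + {l.getD p 0} := by abel
  exact add_right_cancel (add_right_cancel key)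

theorem siftdownGo_ok (pos : Nat) (l : List Int) (ni : Int)
    (hpos : pos < l.length) (h1 : Hp1 l pos) (h2 : Hp2 l pos) (h3 : Hp3 l pos ni) :
    IsHeap (siftdownGo l 0 pos ni) ∧
      ((siftdownGo l 0 pos ni : List Int) : Multiset Int)
        = ((l.set pos ni : List Int) : Multiset Int) := by
  induction pos using Nat.strong_induction_on generalizing l with
  | _ pos ih =>
  rw [siftdownGo]
  by_cases hp0 : 0 < pos
  · rw [dif_pos hp0]
    by_cases hlt : ni < l.getD ((pos - 1) / 2) 0
    · rw [if_pos hlt]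
      set pp := (pos - 1) / 2 with hppdef
      have hpplt : pp < pos := by omega
      have hpplen : pp < l.length := by omega
      set l' := l.set pos (l.getD pp 0) with hl'def
      have hlen' : l'.length = l.length := by simp [hl'def]
      have hgp : ∀ j, j ≠ pos → l'.getD j 0 = l.getD j 0 := fun j hj => getD_set_ne l pos j _ (by omega)
      have hgpos : l'.getD pos 0 = l.getD pp 0 := getD_set_self l pos _ hpos
      have h1' : Hp1 l' pp := by
        intro j hj hj0 hjne hpne
        by_cases hjpos : j = pos
        · exact absurd (by omega : (j - 1) / 2 = pp) hpne
        · rw [hgp j hjpos]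
          by_cases hpj : (j - 1) / 2 = pos
          · rw [hpj, hgpos]
            exact h2 j (by omega) hj0 hpj hp0
          · rw [hgp _ hpj]
            exact h1 j (by omega) hj0 hjpos hpj
      have h2' : Hp2 l' pp := by
        intro j hj hj0 hpj hpp0
        have hgpne : (pp - 1) / 2 ≠ pos := by omega
        rw [hgp _ hgpne]
        have hstep : l.getD ((pp - 1) / 2) 0 ≤ l.getD pp 0 :=
          h1 pp hpplen (by omega) (by omega) (by omega)
        by_cases hjpos : j = pos
        · rw [hjpos, hgpos]; exact hstep
        · rw [hgp j hjpos]
          have hx := h1 j (by omega) hj0 hjpos (by omega)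
          rw [hpj] at hx
          exact le_trans hstep hx
      have h3' : Hp3 l' pp ni := by
        intro j hj hj0 hpj
        by_cases hjpos : j = pos
        · rw [hjpos, hgpos]; exact le_of_lt hlt
        · rw [hgp j hjpos]
          have hx := h1 j (by omega) hj0 hjpos (by omega)
          rw [hpj] at hx
          exact le_trans (le_of_lt hlt) hx
      obtain ⟨ihh, ihm⟩ := ih pp hpplt l' (by omega) h1' h2' h3'
      refine ⟨ihh, ?_⟩
      rw [ihm, hl'def]
      exact set_swap_perm l pos pp ni hpplen hpos (by omega)
    · rw [if_neg hlt]
      refine ⟨?_, rfl⟩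
      intro j hj hj0
      simp only [List.length_set] at hj
      by_cases hjpos : j = pos
      · subst hjpos
        rw [getD_set_self l j ni hj, getD_set_ne l j ((j-1)/2) ni (by omega)]
        omega
      · rw [getD_set_ne l pos j ni (by omega)]
        by_cases hpj : (j - 1) / 2 = pos
        · rw [hpj, getD_set_self l pos ni hpos]
          exact h3 j hj hj0 hpj
        · rw [getD_set_ne l pos _ ni (by omega)]
          exact h1 j hj hj0 hjpos hpj
  · rw [dif_neg hp0]
    have hpz : pos = 0 := by omega
    subst hpz
    refine ⟨?_, rfl⟩
    intro j hj hj0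
    simp only [List.length_set] at hj
    rw [getD_set_ne l 0 j ni (by omega)]
    by_cases hpj : (j - 1) / 2 = 0
    · rw [hpj, getD_set_self l 0 ni hpos]
      exact h3 j hj hj0 hpj
    · rw [getD_set_ne l 0 _ ni (by omega)]
      exact h1 j hj hj0 (by omega) hpj

theorem chooseChild_spec (l : List Int) (pos : Nat) (h : 2 * pos + 1 < l.length) :
    (chooseChild l pos = 2 * pos + 1 ∨ chooseChild l pos = 2 * pos + 2) ∧
    chooseChild l pos < l.length ∧
    (∀ j, j < l.length → (j - 1) / 2 = pos → 0 < j → l.getD (chooseChild l pos) 0 ≤ l.getD j 0) := by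
  unfold chooseChild
  split
  next hc =>
    refine ⟨Or.inr rfl, hc.1, ?_⟩
    intro j hj hpj hj0
    have : j = 2 * pos + 1 ∨ j = 2 * pos + 2 := by omega
    rcases this with h' | h' <;> subst h'
    · omega
    · exact le_refl _
  next hc =>
    refine ⟨Or.inl rfl, h, ?_⟩
    intro j hj hpj hj0
    have : j = 2 * pos + 1 ∨ j = 2 * pos + 2 := by omega
    rcases this with h' | h' <;> subst h'
    · exact le_refl _
    · have : l.getD (2*pos+1) 0 < l.getD (2*pos+2) 0 := by
        by_contra hcon
        exact hc ⟨by omega, hcon⟩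
      omega

theorem siftupGo_ok (n : Nat) (l : List Int) (pos : Nat) (ni : Int)
    (hn : l.length - pos = n)
    (hpos : pos < l.length) (h1 : Hp1 l pos) (h2 : Hp2 l pos) :
    IsHeap (siftupGo l 0 pos ni) ∧
      ((siftupGo l 0 pos ni : List Int) : Multiset Int)
        = ((l.set pos ni : List Int) : Multiset Int) := by
  induction n using Nat.strong_induction_on generalizing l pos with
  | _ n ih =>
  rw [siftupGo]
  by_cases hc : 2 * pos + 1 < l.length
  · rw [dif_pos hc]
    obtain ⟨hcp12, hcplen, hcpmin⟩ := chooseChild_spec l pos hc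
    set cp := chooseChild l pos with hcpdef
    have hcppos : pos < cp := by omega
    have hparcp : (cp - 1) / 2 = pos := by omega
    set l' := l.set pos (l.getD cp 0) with hl'def
    have hlen' : l'.length = l.length := by simp [hl'def]
    have hgp : ∀ j, j ≠ pos → l'.getD j 0 = l.getD j 0 := fun j hj => getD_set_ne l pos j _ (by omega)
    have hgpos : l'.getD pos 0 = l.getD cp 0 := getD_set_self l pos _ hpos
    have h1' : Hp1 l' cp := by
      intro j hj hj0 hjne hpne
      rw [hlen'] at hj
      by_cases hjpos : j = pos
      · rw [hjpos, hgpos, hgp _ (by omega : (pos-1)/2 ≠ pos)]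
        exact h2 cp hcplen (by omega) hparcp (by omega)
      · rw [hgp j hjpos]
        by_cases hpj : (j - 1) / 2 = pos
        · rw [hpj, hgpos]
          exact hcpmin j hj hpj hj0
        · rw [hgp _ hpj]
          exact h1 j hj hj0 hjpos hpj
    have h2' : Hp2 l' cp := by
      intro j hj hj0 hpj hcp0
      rw [hlen'] at hj
      rw [hparcp, hgpos, hgp j (by omega)]
      have hx := h1 j hj hj0 (by omega) (by omega)
      rw [hpj] at hx
      exact hx
    obtain ⟨ihh, ihm⟩ := ih (l.length - cp) (by omega) l' cp (by omega) (by omega) h1' h2'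
    refine ⟨ihh, ?_⟩
    rw [ihm, hl'def]
    exact set_swap_perm l pos cp ni hcplen hpos (by omega)
  · rw [dif_neg hc]
    exact siftdownGo_ok pos l ni hpos h1 h2 (by intro j hj hj0 hpj; omega)

theorem heap_root_min (l : List Int) (hh : IsHeap l) :
    ∀ j, j < l.length → l.getD 0 0 ≤ l.getD j 0 := by
  intro j
  induction j using Nat.strong_induction_on with
  | _ j ih =>
    intro hj
    rcases Nat.eq_zero_or_pos j with h0 | h0
    · subst h0; exact le_refl _
    · exact le_trans (ih ((j-1)/2) (by omega) (by omega)) (hh j hj h0)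

theorem erase_multiset (l : List Int) (m : Int) (h : m ∈ l) :
    ((l.erase m : List Int) : Multiset Int) + {m} = (l : Multiset Int) := by
  rw [← Multiset.coe_erase, add_comm, Multiset.singleton_add, Multiset.cons_erase (by exact_mod_cast h)]

theorem heappush_ok (h : List Int) (x : Int) (hh : IsHeap h) :
    IsHeap (heappush h x) ∧
      ((heappush h x : List Int) : Multiset Int) = x ::ₘ (h : Multiset Int) := by
  unfold heappush
  have hlen : h.length < (h ++ [x]).length := by simp
  have hget : ∀ j, j < h.length → (h ++ [x]).getD j 0 = h.getD j 0 :=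
    fun j hj => List.getD_append h [x] 0 j hj
  have h1 : Hp1 (h ++ [x]) h.length := by
    intro j hj hj0 hjne hpne
    simp only [List.length_append, List.length_cons, List.length_nil] at hj
    rw [hget j (by omega), hget _ (by omega)]
    exact hh j (by omega) hj0
  have h2 : Hp2 (h ++ [x]) h.length := by
    intro j hj hj0 hpj hp0
    simp only [List.length_append, List.length_cons, List.length_nil] at hj
    omega
  have h3 : Hp3 (h ++ [x]) h.length x := by
    intro j hj hj0 hpj
    simp only [List.length_append, List.length_cons, List.length_nil] at hj
    omega
  obtain ⟨hs', hm⟩ := siftdownGo_ok h.length (h ++ [x]) x hlen h1 h2 h3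
  refine ⟨hs', ?_⟩
  have hgl : (h ++ [x]).getD h.length 0 = x := by
    simp [List.getD_eq_getElem?_getD]
  have hms := multiset_set (h ++ [x]) h.length x hlen
  rw [hgl] at hms
  have hx : ((((h ++ [x]).set h.length x : List Int)) : Multiset Int) = ((h ++ [x] : List Int) : Multiset Int) :=
    add_right_cancel hms
  rw [hm, hx]
  have hy : ((h ++ [x] : List Int) : Multiset Int) = (h : Multiset Int) + {x} := rfl
  rw [hy, add_comm, Multiset.singleton_add]

theorem heappop_ok (h : List Int) (hh : IsHeap h) (hne : h ≠ []) :
    (heappop h).1 = h.getD 0 0 ∧ IsHeap (heappop h).2 ∧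
      (((heappop h).2 : List Int) : Multiset Int) + {h.getD 0 0} = (h : Multiset Int) := by
  have hlen : 0 < h.length := List.length_pos_iff.mpr hne
  have hdl : h.dropLast.length = h.length - 1 := List.length_dropLast
  have hrest : ∀ j, j < h.dropLast.length → h.dropLast.getD j 0 = h.getD j 0 := by
    intro j hj
    rw [List.getD_eq_getElem _ _ hj, List.getD_eq_getElem _ _ (by omega), List.getElem_dropLast]
  have hlast : h.getD (h.length - 1) 0 = h.getLast hne := by
    rw [List.getD_eq_getElem _ _ (by omega), List.getLast_eq_getElem]
  by_cases hemp : h.dropLast.isEmpty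
  · have h1 : h.length = 1 := by
      have := List.isEmpty_iff.mp hemp
      have : h.dropLast.length = 0 := by rw [this]; rfl
      omega
    obtain ⟨a, rfl⟩ := List.length_eq_one_iff.mp h1
    refine ⟨by simp [heappop], ?_, by simp [heappop]⟩
    intro j hj hj0
    simp [heappop] at hj
  · have hlen2 : 2 ≤ h.length := by
      have : h.dropLast ≠ [] := by simpa [List.isEmpty_iff] using hemp
      have := List.length_pos_iff.mpr this
      omega
    rw [heappop, if_neg hemp]
    have hget0 : h.dropLast.getD 0 0 = h.getD 0 0 := hrest 0 (by omega)
    set last := h.getD (h.length - 1) 0 with hlastdef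
    set l0 := h.dropLast.set 0 last with hl0def
    have hl0len : l0.length = h.dropLast.length := by simp [hl0def]
    have h1 : Hp1 l0 0 := by
      intro j hj hj0 hjne hpne
      rw [hl0len] at hj
      rw [hl0def, getD_set_ne _ _ _ _ (by omega), getD_set_ne _ _ _ _ (by omega),
          hrest j hj, hrest _ (by omega)]
      exact hh j (by omega) hj0
    have h2 : Hp2 l0 0 := by intro j hj hj0 hpj hp0; omega
    obtain ⟨hs, hm⟩ := siftupGo_ok l0.length l0 0 last rfl (by omega) h1 h2
    refine ⟨hget0, hs, ?_⟩
    rw [hm, hl0def, List.set_set]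
    have hms := multiset_set h.dropLast 0 last (by omega)
    rw [hget0] at hms
    rw [hms]
    rw [hlast]
    conv_rhs => rw [← List.dropLast_append_getLast hne]
    exact rfl

theorem loop_inv (nums : List Int) (ans hA pool : List Int)
    (hms : (hA : Multiset Int) = (pool : Multiset Int)) (hh : IsHeap hA) :
    (nums.foldl stepA (ans, hA)).1 = (nums.foldl stepB (ans, pool)).1 := by
  induction nums generalizing ans hA pool with
  | nil => rfl
  | cons x t ih =>
    simp only [List.foldl_cons]
    by_cases hx : x = 0
    · subst hx
      by_cases hAe : hA.length = 0
      · have hAnil : hA = [] := List.length_eq_zero_iff.mp hAe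
        have hpnil : pool = [] := by
          subst hAnil
          have : (pool : Multiset Int) = 0 := by rw [← hms]; rfl
          simpa using this
        subst hAnil; subst hpnil
        simp only [stepA, stepB]
        rw [show PySem.List.min? ([] : List Int) (fun y => y) = none from rfl]
        exact ih (ans ++ [-1]) [] [] rfl hh
      · have hAne : hA ≠ [] := by intro hcon; exact hAe (by simp [hcon])
        have hpne : pool ≠ [] := by
          intro hcon
          subst hcon
          have : (hA : Multiset Int) = 0 := by rw [hms]; rfl
          exact hAne (by simpa using this)
        obtain ⟨hp1, hp2, hp3⟩ := heappop_ok hA hh hAne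
        obtain ⟨m, hmm⟩ : ∃ m, PySem.List.min? pool (fun y => y) = some m := by
          cases hmin : PySem.List.min? pool (fun y => y) with
          | none => exact absurd (( PySem.List.min?_eq_none_iff pool _).mp hmin) hpne
          | some m => exact ⟨m, rfl⟩
        have hmmem : m ∈ pool := PySem.List.min?_mem hmm
        have hmmin : ∀ y ∈ pool, m ≤ y := PySem.List.min?_isMin hmm
        -- root value equals the min
        have hroot : (heappop hA).1 = m := by
          rw [hp1]
          have hv_mem : hA.getD 0 0 ∈ pool := by
            have : hA.getD 0 0 ∈ hA := by
              rw [List.getD_eq_getElem _ _ (List.length_pos_iff.mpr hAne)]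
              exact List.getElem_mem _
            have : hA.getD 0 0 ∈ (pool : Multiset Int) := by rw [← hms]; exact_mod_cast this
            exact_mod_cast this
          have hm_memA : m ∈ hA := by
            have : m ∈ (hA : Multiset Int) := by rw [hms]; exact_mod_cast hmmem
            exact_mod_cast this
          obtain ⟨j, hj, hjm⟩ := List.mem_iff_getElem.mp hm_memA
          have : hA.getD 0 0 ≤ hA.getD j 0 := heap_root_min hA hh j hj
          rw [List.getD_eq_getElem _ _ hj, hjm] at this
          exact le_antisymm this (hmmin _ hv_mem)
        have hrem : PySem.List.remove? pool m = some (pool.erase m) :=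
          PySem.List.remove?_eq_some_erase pool m hmmem
        simp only [stepA, stepB, if_neg hAe, hmm, hrem]
        rw [hroot]
        apply ih
        · have he := erase_multiset pool m hmmem
          have : (((heappop hA).2 : List Int) : Multiset Int) + {m} = ((pool.erase m : List Int) : Multiset Int) + {m} := by
            rw [he, ← hms, ← hp3, ← hroot, hp1]
          exact add_right_cancel this
        · exact hp2
    · obtain ⟨hps, hpm⟩ := heappush_ok hA x hh
      simp only [stepA, stepB, if_neg hx]
      apply ih
      · rw [hpm, hms]
        rw [show ((pool ++ [x] : List Int) : Multiset Int) = (pool : Multiset Int) + {x} from rfl]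
        rw [add_comm, Multiset.singleton_add]
      · exact hps

-- ===== VERDICT (by name: the statement is the Claim_ definition above) =====
theorem solution_spec : Claim_equal_solution := by
  intro nums _
  unfold Spec_solution solution solution_alt
  exact loop_inv nums [] [] [] rfl (by intro j hj h0; simp at hj)
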